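-- pv_equiv track=rewrite | github.com/zhangsensen/-0927 | etf_rotation/scorer.py | _bucket_factors
-- ===== SOURCE A (Python) =====
-- def _bucket_factors(factors: list) -> dict:
--     """
--     因子分桶（按类别）
--
--     Args:
--         factors: 因子列表
--
--     Returns:
--         分桶字典 {bucket_name: [factors]}
--     """
--     buckets = {
--         "momentum": [],  # 动量类
--         "trend": [],  # 趋势类
--         "volatility": [],  # 波动类
--         "risk": [],  # 风险类
--         "oscillator": [],  # 摆动类
--         "volume": [],  # 量价类
--         "other": [],  # 其他
--     }
--
--     for factor in factors:
--         factor_lower = factor.lower()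
--
--         # 动量类
--         if any(kw in factor_lower for kw in ["momentum", "mom_", "roc", "rocp"]):
--             buckets["momentum"].append(factor)
--         # 趋势类
--         elif any(
--             kw in factor_lower
--             for kw in ["ma", "ema", "sma", "trend", "adx", "aroon"]
--         ):
--             buckets["trend"].append(factor)
--         # 摆动类
--         elif any(
--             kw in factor_lower for kw in ["rsi", "stoch", "willr", "cci", "mfi"]
--         ):
--             buckets["oscillator"].append(factor)
--         # 波动类
--         elif any(kw in factor_lower for kw in ["volatility", "atr", "std", "bb_"]):
--             buckets["volatility"].append(factor)
--         # 风险类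
--         elif any(kw in factor_lower for kw in ["drawdown", "dd_", "risk"]):
--             buckets["risk"].append(factor)
--         # 量价类
--         elif any(kw in factor_lower for kw in ["obv", "volume_", "vwap", "ad_"]):
--             buckets["volume"].append(factor)
--         else:
--             buckets["other"].append(factor)
--
--     # 移除空桶
--     return {k: v for k, v in buckets.items() if v}
-- ===== SOURCE B (Python) =====
-- _PRIORITY = [
--     ("momentum", ("momentum", "mom_", "roc", "rocp")),
--     ("trend", ("ma", "ema", "sma", "trend", "adx", "aroon")),
--     ("oscillator", ("rsi", "stoch", "willr", "cci", "mfi")),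
--     ("volatility", ("volatility", "atr", "std", "bb_")),
--     ("risk", ("drawdown", "dd_", "risk")),
--     ("volume", ("obv", "volume_", "vwap", "ad_")),
-- ]
-- _ORDER = ("momentum", "trend", "volatility", "risk", "oscillator", "volume", "other")
--
--
-- def _bucket_factors(factors: list) -> dict:
--     # Bucket-major successive partitioning: peel off each priority bucket's
--     # matches from the shrinking remainder; whatever survives is "other".
--     rest = [(f, f.lower()) for f in factors]
--     groups = {}
--     for name, kws in _PRIORITY:
--         hit = [p for p in rest if any(kw in p[1] for kw in kws)]
--         rest = [p for p in rest if not any(kw in p[1] for kw in kws)]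
--         groups[name] = [f for f, _ in hit]
--     groups["other"] = [f for f, _ in rest]
--     return {k: groups[k] for k in _ORDER if groups[k]}
-- ===== Notes on version B (the rewrite author's own statement) =====
-- stated objective: alternative
-- what changed: Replaces A's item-major single pass (per-factor if/elif cascade appending into pre-seeded buckets) by a bucket-major algorithm: for each priority bucket in turn, partition the shrinking remainder list into that bucket's matches and the rest, the final remainder becoming 'other', then emit non-empty buckets in the fixed output key order.
import Mathlib
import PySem

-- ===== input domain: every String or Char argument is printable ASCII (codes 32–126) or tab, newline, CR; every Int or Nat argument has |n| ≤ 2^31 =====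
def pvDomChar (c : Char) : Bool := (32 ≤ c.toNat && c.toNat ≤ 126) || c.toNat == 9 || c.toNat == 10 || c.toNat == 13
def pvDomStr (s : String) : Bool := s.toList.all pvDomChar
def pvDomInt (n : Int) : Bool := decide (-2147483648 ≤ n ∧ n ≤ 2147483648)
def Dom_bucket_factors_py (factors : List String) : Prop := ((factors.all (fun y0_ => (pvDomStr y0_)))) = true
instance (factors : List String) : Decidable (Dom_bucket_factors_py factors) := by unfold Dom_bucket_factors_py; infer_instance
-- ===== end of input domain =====

-- B replaces A's item-major single pass (per-factor if/elif cascade into pre-seeded buckets) by a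
-- bucket-major successive partitioning of the shrinking remainder list (alternative decomposition).

-- ===== PORT A =====
-- Literal transliteration of A: pre-seeded dict, cascade of elif branches appending, drop empty buckets.
def bucket_factors_py (factors : List String) : List (String × List String) :=
  let buckets : PySem.Dict String (List String) :=
    PySem.Dict.ofList [("momentum", []), ("trend", []), ("volatility", []), ("risk", []),
                       ("oscillator", []), ("volume", []), ("other", [])]
  let buckets := factors.foldl (fun b factor =>
    let fl := PySem.Str.lower factor
    if (["momentum", "mom_", "roc", "rocp"] : List String).any (fun kw => PySem.Str.isIn kw fl) then
      b.modify "momentum" [] (fun v => v ++ [factor])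
    else if (["ma", "ema", "sma", "trend", "adx", "aroon"] : List String).any (fun kw => PySem.Str.isIn kw fl) then
      b.modify "trend" [] (fun v => v ++ [factor])
    else if (["rsi", "stoch", "willr", "cci", "mfi"] : List String).any (fun kw => PySem.Str.isIn kw fl) then
      b.modify "oscillator" [] (fun v => v ++ [factor])
    else if (["volatility", "atr", "std", "bb_"] : List String).any (fun kw => PySem.Str.isIn kw fl) then
      b.modify "volatility" [] (fun v => v ++ [factor])
    else if (["drawdown", "dd_", "risk"] : List String).any (fun kw => PySem.Str.isIn kw fl) then
      b.modify "risk" [] (fun v => v ++ [factor])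
    else if (["obv", "volume_", "vwap", "ad_"] : List String).any (fun kw => PySem.Str.isIn kw fl) then
      b.modify "volume" [] (fun v => v ++ [factor])
    else
      b.modify "other" [] (fun v => v ++ [factor])) buckets
  buckets.items.filter (fun kv => !kv.2.isEmpty)

-- ===== PORT B =====
-- Source B's _PRIORITY table (matching order) and _ORDER (output key order).
def pvPriority : List (String × List String) :=
  [("momentum", ["momentum", "mom_", "roc", "rocp"]),
   ("trend", ["ma", "ema", "sma", "trend", "adx", "aroon"]),
   ("oscillator", ["rsi", "stoch", "willr", "cci", "mfi"]),
   ("volatility", ["volatility", "atr", "std", "bb_"]),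
   ("risk", ["drawdown", "dd_", "risk"]),
   ("volume", ["obv", "volume_", "vwap", "ad_"])]

def pvOrder : List String :=
  ["momentum", "trend", "volatility", "risk", "oscillator", "volume", "other"]

-- Source B: peel off each priority bucket's matches from the shrinking remainder; the final
-- remainder becomes "other"; emit non-empty buckets in the fixed output key order.
def bucket_factors_py_alt (factors : List String) : List (String × List String) :=
  let st := pvPriority.foldl
    (fun (st : PySem.Dict String (List String) × List (String × String)) nk =>
      let hit := st.2.filter (fun p => nk.2.any (fun kw => PySem.Str.isIn kw p.2))
      let rest := st.2.filter (fun p => !(nk.2.any (fun kw => PySem.Str.isIn kw p.2)))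
      (st.1.insert nk.1 (hit.map Prod.fst), rest))
    (PySem.Dict.empty, factors.map (fun f => (f, PySem.Str.lower f)))
  let groups := st.1.insert "other" (st.2.map Prod.fst)
  pvOrder.filterMap (fun k =>
    match groups.get? k with
    | some v => if v.isEmpty then none else some (k, v)
    | none => none)

-- ===== PRECONDITION & SPEC =====
def Spec_bucket_factors_py (factors : List String) (out : List (String × List String)) : Prop := out = bucket_factors_py_alt factors
instance (factors : List String) (out : List (String × List String)) : Decidable (Spec_bucket_factors_py factors out) := by unfold Spec_bucket_factors_py; infer_instance

-- ===== CLAIM =====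
def Claim_equal_bucket_factors_py : Prop := ∀ (factors : List String), Dom_bucket_factors_py factors → Spec_bucket_factors_py factors (bucket_factors_py factors)

-- ===== LEMMAS AND PROOFS =====

-- proof-only helper: the bucket a factor lands in (first matching priority row, else "other")
def pvClassify (factor : String) : String :=
  let fl := PySem.Str.lower factor
  match pvPriority.find? (fun p => p.2.any (fun kw => PySem.Str.isIn kw fl)) with
  | some p => p.1
  | none => "other"

-- A's loop body is exactly "modify at the bucket pvClassify picks".
theorem pv_stepA_eq (b : PySem.Dict String (List String)) (factor : String) :
    (let fl := PySem.Str.lower factor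
     if (["momentum", "mom_", "roc", "rocp"] : List String).any (fun kw => PySem.Str.isIn kw fl) then
       b.modify "momentum" [] (fun v => v ++ [factor])
     else if (["ma", "ema", "sma", "trend", "adx", "aroon"] : List String).any (fun kw => PySem.Str.isIn kw fl) then
       b.modify "trend" [] (fun v => v ++ [factor])
     else if (["rsi", "stoch", "willr", "cci", "mfi"] : List String).any (fun kw => PySem.Str.isIn kw fl) then
       b.modify "oscillator" [] (fun v => v ++ [factor])
     else if (["volatility", "atr", "std", "bb_"] : List String).any (fun kw => PySem.Str.isIn kw fl) then
       b.modify "volatility" [] (fun v => v ++ [factor])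
     else if (["drawdown", "dd_", "risk"] : List String).any (fun kw => PySem.Str.isIn kw fl) then
       b.modify "risk" [] (fun v => v ++ [factor])
     else if (["obv", "volume_", "vwap", "ad_"] : List String).any (fun kw => PySem.Str.isIn kw fl) then
       b.modify "volume" [] (fun v => v ++ [factor])
     else
       b.modify "other" [] (fun v => v ++ [factor])) =
    b.modify (pvClassify factor) [] (fun v => v ++ [factor]) := by
  simp only [pvClassify, pvPriority, List.find?]
  cases h1 : (["momentum", "mom_", "roc", "rocp"] : List String).any (fun kw => PySem.Str.isIn kw (PySem.Str.lower factor)) <;>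
  cases h2 : (["ma", "ema", "sma", "trend", "adx", "aroon"] : List String).any (fun kw => PySem.Str.isIn kw (PySem.Str.lower factor)) <;>
  cases h3 : (["rsi", "stoch", "willr", "cci", "mfi"] : List String).any (fun kw => PySem.Str.isIn kw (PySem.Str.lower factor)) <;>
  cases h4 : (["volatility", "atr", "std", "bb_"] : List String).any (fun kw => PySem.Str.isIn kw (PySem.Str.lower factor)) <;>
  cases h5 : (["drawdown", "dd_", "risk"] : List String).any (fun kw => PySem.Str.isIn kw (PySem.Str.lower factor)) <;>
  cases h6 : (["obv", "volume_", "vwap", "ad_"] : List String).any (fun kw => PySem.Str.isIn kw (PySem.Str.lower factor)) <;>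
    simp only [if_true, if_false, Bool.false_eq_true]

theorem pv_classify_mem (factor : String) : pvClassify factor ∈ pvOrder := by
  simp only [pvClassify, pvPriority, List.find?]
  cases h1 : (["momentum", "mom_", "roc", "rocp"] : List String).any (fun kw => PySem.Str.isIn kw (PySem.Str.lower factor)) <;>
  cases h2 : (["ma", "ema", "sma", "trend", "adx", "aroon"] : List String).any (fun kw => PySem.Str.isIn kw (PySem.Str.lower factor)) <;>
  cases h3 : (["rsi", "stoch", "willr", "cci", "mfi"] : List String).any (fun kw => PySem.Str.isIn kw (PySem.Str.lower factor)) <;>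
  cases h4 : (["volatility", "atr", "std", "bb_"] : List String).any (fun kw => PySem.Str.isIn kw (PySem.Str.lower factor)) <;>
  cases h5 : (["drawdown", "dd_", "risk"] : List String).any (fun kw => PySem.Str.isIn kw (PySem.Str.lower factor)) <;>
  cases h6 : (["obv", "volume_", "vwap", "ad_"] : List String).any (fun kw => PySem.Str.isIn kw (PySem.Str.lower factor)) <;>
    decide

-- value of a bucket after A's grouping fold
theorem pv_getD_fold (factors : List String) (d : PySem.Dict String (List String)) (k : String) :
    (factors.foldl (fun d f => d.modify (pvClassify f) [] (fun v => v ++ [f])) d).getD k []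
      = d.getD k [] ++ factors.filter (fun f => pvClassify f == k) := by
  rw [show factors.foldl (fun d f => d.modify (pvClassify f) [] (fun v => v ++ [f])) d
        = (factors.map (fun f => (pvClassify f, f))).foldl (fun d p => d.modify p.1 [] (fun v => v ++ [p.2])) d
      from (List.foldl_map (f := fun f => (pvClassify f, f)) (g := fun d p => d.modify p.1 [] (fun v => v ++ [p.2])) (l := factors) (init := d)).symm]
  rw [PySem.Dict.getD_foldl_modify_append]
  simp [List.filter_map, List.map_map, Function.comp_def]

-- keys after A's grouping fold
theorem pv_keys_fold (factors : List String) (d : PySem.Dict String (List String)) :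
    (factors.foldl (fun d f => d.modify (pvClassify f) [] (fun v => v ++ [f])) d).keys
      = PySem.Set.update d.keys (factors.map pvClassify) :=
  PySem.Dict.keys_foldl_modify_key factors pvClassify [] (fun _ f => fun v => v ++ [f]) d

-- A in canonical form: per key of pvOrder, the factors classified there, empty buckets dropped.
theorem pv_A_char (factors : List String) :
    bucket_factors_py factors
      = (pvOrder.map (fun k => (k, factors.filter (fun f => pvClassify f == k)))).filter
          (fun kv => !kv.2.isEmpty) := by
  unfold bucket_factors_py
  have hfun : (fun (b : PySem.Dict String (List String)) (factor : String) =>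
      let fl := PySem.Str.lower factor
      if (["momentum", "mom_", "roc", "rocp"] : List String).any (fun kw => PySem.Str.isIn kw fl) then
        b.modify "momentum" [] (fun v => v ++ [factor])
      else if (["ma", "ema", "sma", "trend", "adx", "aroon"] : List String).any (fun kw => PySem.Str.isIn kw fl) then
        b.modify "trend" [] (fun v => v ++ [factor])
      else if (["rsi", "stoch", "willr", "cci", "mfi"] : List String).any (fun kw => PySem.Str.isIn kw fl) then
        b.modify "oscillator" [] (fun v => v ++ [factor])
      else if (["volatility", "atr", "std", "bb_"] : List String).any (fun kw => PySem.Str.isIn kw fl) then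
        b.modify "volatility" [] (fun v => v ++ [factor])
      else if (["drawdown", "dd_", "risk"] : List String).any (fun kw => PySem.Str.isIn kw fl) then
        b.modify "risk" [] (fun v => v ++ [factor])
      else if (["obv", "volume_", "vwap", "ad_"] : List String).any (fun kw => PySem.Str.isIn kw fl) then
        b.modify "volume" [] (fun v => v ++ [factor])
      else
        b.modify "other" [] (fun v => v ++ [factor]))
      = (fun b f => b.modify (pvClassify f) [] (fun v => v ++ [f])) :=
    funext fun b => funext fun f => pv_stepA_eq b f
  rw [hfun]
  dsimp only
  have hb0keys : (PySem.Dict.ofList [("momentum", ([] : List String)), ("trend", []), ("volatility", []),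
      ("risk", []), ("oscillator", []), ("volume", []), ("other", [])]).keys = pvOrder := by decide
  have hkeysA : (factors.foldl (fun b f => b.modify (pvClassify f) [] (fun v => v ++ [f]))
      (PySem.Dict.ofList [("momentum", ([] : List String)), ("trend", []), ("volatility", []),
        ("risk", []), ("oscillator", []), ("volume", []), ("other", [])])).keys = pvOrder := by
    rw [pv_keys_fold, hb0keys, PySem.Set.update_eq_append_filter]
    have hnil : List.filter (fun y => !PySem.Set.contains pvOrder y)
        (PySem.Set.ofList (factors.map pvClassify)) = [] := by
      apply List.filter_eq_nil_iff.mpr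
      intro y hy
      obtain ⟨f, _, he⟩ := List.mem_map.mp ((PySem.Set.mem_ofList _ _).mp hy)
      simp only [Bool.not_eq_true, Bool.not_eq_false']
      exact (PySem.Set.contains_iff pvOrder y).mpr (he ▸ pv_classify_mem f)
    rw [hnil, List.append_nil]
  have hndA : (factors.foldl (fun b f => b.modify (pvClassify f) [] (fun v => v ++ [f]))
      (PySem.Dict.ofList [("momentum", ([] : List String)), ("trend", []), ("volatility", []),
        ("risk", []), ("oscillator", []), ("volume", []), ("other", [])])).keys.Nodup := by
    rw [hkeysA]; decide
  rw [PySem.Dict.items_eq_map_keys _ hndA [], hkeysA]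
  have hb0getD : ∀ k : String, (PySem.Dict.ofList [("momentum", ([] : List String)), ("trend", []),
      ("volatility", []), ("risk", []), ("oscillator", []), ("volume", []), ("other", [])]).getD k [] = [] := by
    intro k
    simp only [PySem.Dict.ofList, PySem.Dict.update, List.foldl]
    simp [PySem.Dict.getD_insert]
  congr 1
  exact List.map_congr_left (fun k _ => by rw [pv_getD_fold, hb0getD, List.nil_append])

theorem pv_proj (factors : List String) (q : String × String → Bool) (pred : String → Bool)
    (h : ∀ f, q (f, PySem.Str.lower f) = pred f) :
    (List.map Prod.fst (List.filter q (List.map (fun f => (f, PySem.Str.lower f)) factors)))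
      = factors.filter pred := by
  rw [List.filter_map, List.map_map]
  have h2 : (Prod.fst ∘ fun f => (f, PySem.Str.lower f)) = id := rfl
  rw [h2, List.map_id]
  exact List.filter_congr (fun f _ => h f)

theorem pv_ite_congr (k : String) {v w : List String} (h : v = w) :
    (if v.isEmpty then (none : Option (String × List String)) else some (k, v))
      = (if w.isEmpty then none else some (k, w)) := by rw [h]

theorem pv_B_char (factors : List String) :
    bucket_factors_py_alt factors
      = pvOrder.filterMap (fun k =>
          if (factors.filter (fun f => pvClassify f == k)).isEmpty then none
          else some (k, factors.filter (fun f => pvClassify f == k))) := by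
  unfold bucket_factors_py_alt
  simp only [pvPriority, List.foldl_cons, List.foldl_nil]
  refine List.filterMap_congr ?_
  intro k hk
  fin_cases hk
  · simp only [PySem.Dict.get?_insert, PySem.Dict.get?_empty, String.reduceEq, reduceIte,
      List.filter_filter]
    apply pv_ite_congr
    refine pv_proj factors _ _ ?_
    intro f
    simp only [pvClassify, pvPriority, List.find?]
    cases h1 : (["momentum", "mom_", "roc", "rocp"] : List String).any (fun kw => PySem.Str.isIn kw (PySem.Str.lower f)) <;>
    cases h2 : (["ma", "ema", "sma", "trend", "adx", "aroon"] : List String).any (fun kw => PySem.Str.isIn kw (PySem.Str.lower f)) <;>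
    cases h3 : (["rsi", "stoch", "willr", "cci", "mfi"] : List String).any (fun kw => PySem.Str.isIn kw (PySem.Str.lower f)) <;>
    cases h4 : (["volatility", "atr", "std", "bb_"] : List String).any (fun kw => PySem.Str.isIn kw (PySem.Str.lower f)) <;>
    cases h5 : (["drawdown", "dd_", "risk"] : List String).any (fun kw => PySem.Str.isIn kw (PySem.Str.lower f)) <;>
    cases h6 : (["obv", "volume_", "vwap", "ad_"] : List String).any (fun kw => PySem.Str.isIn kw (PySem.Str.lower f)) <;>
      decide
  · simp only [PySem.Dict.get?_insert, PySem.Dict.get?_empty, String.reduceEq, reduceIte,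
      List.filter_filter]
    apply pv_ite_congr
    refine pv_proj factors _ _ ?_
    intro f
    simp only [pvClassify, pvPriority, List.find?]
    cases h1 : (["momentum", "mom_", "roc", "rocp"] : List String).any (fun kw => PySem.Str.isIn kw (PySem.Str.lower f)) <;>
    cases h2 : (["ma", "ema", "sma", "trend", "adx", "aroon"] : List String).any (fun kw => PySem.Str.isIn kw (PySem.Str.lower f)) <;>
    cases h3 : (["rsi", "stoch", "willr", "cci", "mfi"] : List String).any (fun kw => PySem.Str.isIn kw (PySem.Str.lower f)) <;>
    cases h4 : (["volatility", "atr", "std", "bb_"] : List String).any (fun kw => PySem.Str.isIn kw (PySem.Str.lower f)) <;>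
    cases h5 : (["drawdown", "dd_", "risk"] : List String).any (fun kw => PySem.Str.isIn kw (PySem.Str.lower f)) <;>
    cases h6 : (["obv", "volume_", "vwap", "ad_"] : List String).any (fun kw => PySem.Str.isIn kw (PySem.Str.lower f)) <;>
      decide
  · simp only [PySem.Dict.get?_insert, PySem.Dict.get?_empty, String.reduceEq, reduceIte,
      List.filter_filter]
    apply pv_ite_congr
    refine pv_proj factors _ _ ?_
    intro f
    simp only [pvClassify, pvPriority, List.find?]
    cases h1 : (["momentum", "mom_", "roc", "rocp"] : List String).any (fun kw => PySem.Str.isIn kw (PySem.Str.lower f)) <;>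
    cases h2 : (["ma", "ema", "sma", "trend", "adx", "aroon"] : List String).any (fun kw => PySem.Str.isIn kw (PySem.Str.lower f)) <;>
    cases h3 : (["rsi", "stoch", "willr", "cci", "mfi"] : List String).any (fun kw => PySem.Str.isIn kw (PySem.Str.lower f)) <;>
    cases h4 : (["volatility", "atr", "std", "bb_"] : List String).any (fun kw => PySem.Str.isIn kw (PySem.Str.lower f)) <;>
    cases h5 : (["drawdown", "dd_", "risk"] : List String).any (fun kw => PySem.Str.isIn kw (PySem.Str.lower f)) <;>
    cases h6 : (["obv", "volume_", "vwap", "ad_"] : List String).any (fun kw => PySem.Str.isIn kw (PySem.Str.lower f)) <;>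
      decide
  · simp only [PySem.Dict.get?_insert, PySem.Dict.get?_empty, String.reduceEq, reduceIte,
      List.filter_filter]
    apply pv_ite_congr
    refine pv_proj factors _ _ ?_
    intro f
    simp only [pvClassify, pvPriority, List.find?]
    cases h1 : (["momentum", "mom_", "roc", "rocp"] : List String).any (fun kw => PySem.Str.isIn kw (PySem.Str.lower f)) <;>
    cases h2 : (["ma", "ema", "sma", "trend", "adx", "aroon"] : List String).any (fun kw => PySem.Str.isIn kw (PySem.Str.lower f)) <;>
    cases h3 : (["rsi", "stoch", "willr", "cci", "mfi"] : List String).any (fun kw => PySem.Str.isIn kw (PySem.Str.lower f)) <;>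
    cases h4 : (["volatility", "atr", "std", "bb_"] : List String).any (fun kw => PySem.Str.isIn kw (PySem.Str.lower f)) <;>
    cases h5 : (["drawdown", "dd_", "risk"] : List String).any (fun kw => PySem.Str.isIn kw (PySem.Str.lower f)) <;>
    cases h6 : (["obv", "volume_", "vwap", "ad_"] : List String).any (fun kw => PySem.Str.isIn kw (PySem.Str.lower f)) <;>
      decide
  · simp only [PySem.Dict.get?_insert, PySem.Dict.get?_empty, String.reduceEq, reduceIte,
      List.filter_filter]
    apply pv_ite_congr
    refine pv_proj factors _ _ ?_
    intro f
    simp only [pvClassify, pvPriority, List.find?]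
    cases h1 : (["momentum", "mom_", "roc", "rocp"] : List String).any (fun kw => PySem.Str.isIn kw (PySem.Str.lower f)) <;>
    cases h2 : (["ma", "ema", "sma", "trend", "adx", "aroon"] : List String).any (fun kw => PySem.Str.isIn kw (PySem.Str.lower f)) <;>
    cases h3 : (["rsi", "stoch", "willr", "cci", "mfi"] : List String).any (fun kw => PySem.Str.isIn kw (PySem.Str.lower f)) <;>
    cases h4 : (["volatility", "atr", "std", "bb_"] : List String).any (fun kw => PySem.Str.isIn kw (PySem.Str.lower f)) <;>
    cases h5 : (["drawdown", "dd_", "risk"] : List String).any (fun kw => PySem.Str.isIn kw (PySem.Str.lower f)) <;>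
    cases h6 : (["obv", "volume_", "vwap", "ad_"] : List String).any (fun kw => PySem.Str.isIn kw (PySem.Str.lower f)) <;>
      decide
  · simp only [PySem.Dict.get?_insert, PySem.Dict.get?_empty, String.reduceEq, reduceIte,
      List.filter_filter]
    apply pv_ite_congr
    refine pv_proj factors _ _ ?_
    intro f
    simp only [pvClassify, pvPriority, List.find?]
    cases h1 : (["momentum", "mom_", "roc", "rocp"] : List String).any (fun kw => PySem.Str.isIn kw (PySem.Str.lower f)) <;>
    cases h2 : (["ma", "ema", "sma", "trend", "adx", "aroon"] : List String).any (fun kw => PySem.Str.isIn kw (PySem.Str.lower f)) <;>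
    cases h3 : (["rsi", "stoch", "willr", "cci", "mfi"] : List String).any (fun kw => PySem.Str.isIn kw (PySem.Str.lower f)) <;>
    cases h4 : (["volatility", "atr", "std", "bb_"] : List String).any (fun kw => PySem.Str.isIn kw (PySem.Str.lower f)) <;>
    cases h5 : (["drawdown", "dd_", "risk"] : List String).any (fun kw => PySem.Str.isIn kw (PySem.Str.lower f)) <;>
    cases h6 : (["obv", "volume_", "vwap", "ad_"] : List String).any (fun kw => PySem.Str.isIn kw (PySem.Str.lower f)) <;>
      decide
  · simp only [PySem.Dict.get?_insert, PySem.Dict.get?_empty, String.reduceEq, reduceIte,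
      List.filter_filter]
    apply pv_ite_congr
    refine pv_proj factors _ _ ?_
    intro f
    simp only [pvClassify, pvPriority, List.find?]
    cases h1 : (["momentum", "mom_", "roc", "rocp"] : List String).any (fun kw => PySem.Str.isIn kw (PySem.Str.lower f)) <;>
    cases h2 : (["ma", "ema", "sma", "trend", "adx", "aroon"] : List String).any (fun kw => PySem.Str.isIn kw (PySem.Str.lower f)) <;>
    cases h3 : (["rsi", "stoch", "willr", "cci", "mfi"] : List String).any (fun kw => PySem.Str.isIn kw (PySem.Str.lower f)) <;>
    cases h4 : (["volatility", "atr", "std", "bb_"] : List String).any (fun kw => PySem.Str.isIn kw (PySem.Str.lower f)) <;>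
    cases h5 : (["drawdown", "dd_", "risk"] : List String).any (fun kw => PySem.Str.isIn kw (PySem.Str.lower f)) <;>
    cases h6 : (["obv", "volume_", "vwap", "ad_"] : List String).any (fun kw => PySem.Str.isIn kw (PySem.Str.lower f)) <;>
      decide

-- filterMap with an emptiness guard is map-then-filter
theorem pv_guard (l : List String) (F : String → List String) :
    l.filterMap (fun k => if (F k).isEmpty then none else some (k, F k))
      = (l.map (fun k => (k, F k))).filter (fun kv => !kv.2.isEmpty) := by
  induction l with
  | nil => rfl
  | cons x tl ih =>
    by_cases h : (F x).isEmpty <;>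
      simp only [List.filterMap_cons, List.map_cons, List.filter_cons, h, if_true,
        Bool.not_true, Bool.not_false, ih] <;> rfl

-- ===== VERDICT =====
theorem bucket_factors_py_spec : Claim_equal_bucket_factors_py := by
  intro factors _
  unfold Spec_bucket_factors_py
  rw [pv_A_char, pv_B_char]
  exact (pv_guard pvOrder (fun k => factors.filter (fun f => pvClassify f == k))).symm
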